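-- pv_equiv track=rewrite | github.com/areumsim/code_test | coding_test_2_N/ex1.py | solution
-- ===== SOURCE A (Python) =====
-- def solution(S):
--     cnt = 0
--     i = 0
--     while i < len(S):
--         if S[i] == "X":
--             cnt += 1
--             i += 3  # 현재 "X"와 다음 두 문자 건너뛰기
--         else:
--             i += 1
--
--     return cnt
-- ===== SOURCE B (Python) =====
-- def solution(S):
--     positions = [i for i, c in enumerate(S) if c == "X"]
--     cnt = 0
--     thr = 0
--     for p in positions:
--         if p >= thr:
--             cnt += 1
--             thr = p + 3
--     return cnt
-- ===== Notes on version B (the rewrite author's own statement) =====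
-- stated objective: alternative
-- what changed: Instead of A's single while-loop character scan that jumps the index by 3 after each match, B runs two phases: a comprehension extracts the list of match positions, then an interval greedy over those positions counts a position iff it is at least the current threshold and moves the threshold to position+3; this is correct because A counts exactly the matches whose index is at least 3 past the previously counted one.
import Mathlib
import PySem

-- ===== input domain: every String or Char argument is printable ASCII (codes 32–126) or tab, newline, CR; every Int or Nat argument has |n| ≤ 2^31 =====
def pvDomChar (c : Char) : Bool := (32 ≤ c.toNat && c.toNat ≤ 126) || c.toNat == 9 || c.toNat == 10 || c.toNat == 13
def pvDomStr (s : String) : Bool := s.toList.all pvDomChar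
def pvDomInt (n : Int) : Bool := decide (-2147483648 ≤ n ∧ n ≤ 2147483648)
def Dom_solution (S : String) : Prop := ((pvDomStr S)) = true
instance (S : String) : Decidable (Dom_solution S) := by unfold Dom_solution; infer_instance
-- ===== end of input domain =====

-- B replaces A's skip-by-3 character scan by a two-phase algorithm: extract the
-- list of 'X' positions, then an interval greedy over those positions; same cost.

-- ===== PORT A =====
-- literal port of A's while loop: state (cnt, i), scanning by index
def solutionGo (cs : List Char) (cnt : Int) (i : Nat) : Int :=
  if h : i < cs.length then
    if cs[i] = 'X' then solutionGo cs (cnt + 1) (i + 3)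
    else solutionGo cs cnt (i + 1)
  else cnt
termination_by cs.length - i
decreasing_by all_goals omega

def solution (S : String) : Int := solutionGo S.toList 0 0

-- ===== PORT B =====
-- port of Source B: the comprehension over enumerate(S) is a filterMap over
-- PySem.List.enumerate; the for-loop over positions is a foldl on state (cnt, thr)
def solution_alt (S : String) : Int :=
  let positions : List Int :=
    (PySem.List.enumerate S.toList 0).filterMap
      (fun ic => if ic.2 = 'X' then some ic.1 else none)
  (positions.foldl
    (fun (st : Int × Int) p => if p ≥ st.2 then (st.1 + 1, p + 3) else st) (0, 0)).1

-- ===== PRECONDITION & SPEC =====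
def Spec_solution (S : String) (out : Int) : Prop := out = solution_alt S
instance (S : String) (out : Int) : Decidable (Spec_solution S out) := by unfold Spec_solution; infer_instance

-- ===== CLAIM (what is proved, stated in full; the proofs are below) =====
def Claim_equal_solution : Prop := ∀ (S : String), Dom_solution S → Spec_solution S (solution S)

-- ===== LEMMAS AND PROOFS =====

-- proof-only helpers: skip-by-3 count on the suffix, X positions from offset, greedy over positions
def skipCount : List Char → Int
  | [] => 0
  | c :: rest => if c = 'X' then 1 + skipCount (rest.drop 2) else skipCount rest
termination_by l => l.length
decreasing_by all_goals simp

def posFrom : List Char → Int → List Int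
  | [], _ => []
  | c :: rest, i => if c = 'X' then i :: posFrom rest (i + 1) else posFrom rest (i + 1)

def greedy : List Int → Int → Int
  | [], _ => 0
  | p :: ps, thr => if p ≥ thr then 1 + greedy ps (p + 3) else greedy ps thr

theorem solutionGo_eq (cs : List Char) (i : Nat) (cnt : Int) :
    solutionGo cs cnt i = cnt + skipCount (cs.drop i) := by
  by_cases h : i < cs.length
  · have hdrop : cs.drop i = cs[i] :: cs.drop (i + 1) := List.drop_eq_getElem_cons h
    by_cases hx : cs[i] = 'X'
    · rw [solutionGo, dif_pos h, if_pos hx, solutionGo_eq cs (i + 3) (cnt + 1), hdrop]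
      have : (cs.drop (i + 1)).drop 2 = cs.drop (i + 3) := by rw [List.drop_drop]
      simp [skipCount, hx, this]
      ring
    · rw [solutionGo, dif_pos h, if_neg hx, solutionGo_eq cs (i + 1) cnt, hdrop,
        skipCount, if_neg hx]
  · have : cs.drop i = [] := List.drop_eq_nil_of_le (by omega)
    rw [solutionGo, dif_neg h, this]
    simp [skipCount]
termination_by cs.length - i
decreasing_by all_goals omega

theorem enum_filterMap_eq_posFrom (cs : List Char) (i : Int) :
    (PySem.List.enumerate cs i).filterMap
      (fun ic => if ic.2 = 'X' then some ic.1 else none) = posFrom cs i := by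
  induction cs generalizing i with
  | nil => simp [PySem.List.enumerate_nil, posFrom]
  | cons c rest ih =>
    rw [PySem.List.enumerate_cons]
    by_cases hx : c = 'X' <;> simp [posFrom, hx, ih]

theorem foldl_eq_greedy (ps : List Int) (cnt thr : Int) :
    (ps.foldl (fun (st : Int × Int) p => if p ≥ st.2 then (st.1 + 1, p + 3) else st)
      (cnt, thr)).1 = cnt + greedy ps thr := by
  induction ps generalizing cnt thr with
  | nil => simp [greedy]
  | cons p ps ih =>
    by_cases h : p ≥ thr <;> simp [greedy, h, ih] <;> ring

-- the greedy over the X positions computes exactly the skip-by-3 count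
theorem greedy_posFrom (cs : List Char) (i thr : Int) (h : thr ≤ i) :
    greedy (posFrom cs i) thr = skipCount cs := by
  match cs with
  | [] => simp [posFrom, skipCount, greedy]
  | c :: rest =>
    by_cases hx : c = 'X'
    · rw [posFrom, if_pos hx, skipCount, if_pos hx, greedy, if_pos (by omega)]
      congr 1
      match rest with
      | [] => simp [posFrom, skipCount, greedy]
      | [a] =>
        by_cases ha : a = 'X' <;>
          simp [posFrom, ha, greedy, skipCount, show ¬ (i + 1 ≥ i + 3) by omega]
      | a :: b :: t =>
        have ht : greedy (posFrom t (i + 3)) (i + 3) = skipCount t :=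
          greedy_posFrom t (i + 3) (i + 3) le_rfl
        by_cases ha : a = 'X' <;> by_cases hb : b = 'X' <;>
          simp [posFrom, ha, hb, greedy, show ¬ (i + 1 ≥ i + 3) by omega,
            show ¬ (i + 1 + 1 ≥ i + 3) by omega,
            show i + 1 + 1 + 1 = i + 3 by ring, ht]
    · rw [posFrom, if_neg hx, skipCount, if_neg hx]
      exact greedy_posFrom rest (i + 1) thr (by omega)
termination_by cs.length
decreasing_by all_goals simp <;> omega

-- ===== VERDICT (by name: the statement is the Claim_ definition above) =====
theorem solution_spec : Claim_equal_solution := by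
  intro S _
  unfold Spec_solution solution solution_alt
  rw [enum_filterMap_eq_posFrom, foldl_eq_greedy, greedy_posFrom S.toList 0 0 le_rfl]
  simpa using solutionGo_eq S.toList 0 0
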